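-- pv_equiv track=rewrite | github.com/ahlee-shawn/Machine-Learning-2019-Spring-NCTU | Lab4/hw4_logistic_regression.py | I_mul_scalar
-- ===== SOURCE A (Python) =====
-- def I_mul_scalar(scalar, size):
-- 	result = []
-- 	for i in range(size):
-- 		temp = []
-- 		for j in range(size):
-- 			if(i == j):
-- 				temp.append(scalar)
-- 			else:
-- 				temp.append(0)
-- 		result.append(temp)
-- 	return result
-- ===== SOURCE B (Python) =====
-- def I_mul_scalar(scalar, size):
--     # shift-register construction: the first row is [scalar, 0, ..., 0]; every
--     # following row is the previous row shifted one place to the right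
--     if size <= 0:
--         return []
--     result = [[scalar] + [0] * (size - 1)]
--     for _ in range(size - 1):
--         prev = result[-1]
--         result.append([0] + prev[:-1])
--     return result
-- ===== Notes on version B (the rewrite author's own statement) =====
-- stated objective: alternative
-- what changed: B is a shift-register construction: it builds only the first row [scalar,0,...,0] explicitly and derives each following row by shifting the previous row one place to the right ([0]+prev[:-1]), eliminating A's nested per-cell i==j branch entirely.
import Mathlib
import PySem

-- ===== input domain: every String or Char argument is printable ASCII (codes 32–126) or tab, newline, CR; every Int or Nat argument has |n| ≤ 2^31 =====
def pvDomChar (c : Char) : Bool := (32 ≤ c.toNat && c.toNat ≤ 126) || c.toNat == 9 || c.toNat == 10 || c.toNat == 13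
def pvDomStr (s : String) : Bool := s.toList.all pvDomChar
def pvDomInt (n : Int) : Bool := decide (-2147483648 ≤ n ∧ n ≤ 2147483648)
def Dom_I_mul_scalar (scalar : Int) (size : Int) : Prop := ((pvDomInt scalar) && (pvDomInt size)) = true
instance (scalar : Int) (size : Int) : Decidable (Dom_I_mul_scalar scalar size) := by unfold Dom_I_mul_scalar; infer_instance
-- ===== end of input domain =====

-- B is a shift-register construction: only the first row [scalar,0,...,0] is built explicitly,
-- and each following row is the previous row shifted one place to the right, eliminating A's
-- per-cell i==j branch (objective: alternative, same O(n^2) cost).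

-- ===== PORT A =====
-- literal port of A: nested range loops appending scalar on the diagonal and 0 elsewhere
def I_mul_scalar (scalar : Int) (size : Int) : List (List Int) :=
  (PySem.List.pyRange 0 size 1).foldl (fun result i =>
    result ++ [ (PySem.List.pyRange 0 size 1).foldl (fun temp j =>
      temp ++ [if i == j then scalar else 0]) [] ]) []

-- ===== PORT B =====
-- literal port of B: first row [scalar]+[0]*(size-1), then size-1 times append [0]+prev[:-1]
-- (result[-1] via pyGet?; the .getD [] default is never reached: result is always nonempty)
def I_mul_scalar_alt (scalar : Int) (size : Int) : List (List Int) :=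
  if size ≤ 0 then []
  else
    (PySem.List.pyRange 0 (size - 1) 1).foldl (fun result _ =>
      let prev := (PySem.List.pyGet? result (-1)).getD []
      result ++ [[0] ++ PySem.List.slice prev none (some (-1))])
      [[scalar] ++ List.replicate (size - 1).toNat 0]

-- ===== PRECONDITION & SPEC =====
def Spec_I_mul_scalar (scalar : Int) (size : Int) (out : List (List Int)) : Prop := out = I_mul_scalar_alt scalar size
instance (scalar : Int) (size : Int) (out : List (List Int)) : Decidable (Spec_I_mul_scalar scalar size out) := by unfold Spec_I_mul_scalar; infer_instance

-- ===== CLAIM (what is proved, stated in full; the proofs are below) =====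
def Claim_equal_I_mul_scalar : Prop := ∀ (scalar : Int) (size : Int), Dom_I_mul_scalar scalar size → Spec_I_mul_scalar scalar size (I_mul_scalar scalar size)

-- ===== LEMMAS AND PROOFS =====

-- the canonical scalar-identity matrix, Nat-indexed
def pvMrow (scalar : Int) (n i : Nat) : List Int :=
  (List.range n).map (fun j => if i = j then scalar else 0)

def pvM (scalar : Int) (n : Nat) : List (List Int) :=
  (List.range n).map (pvMrow scalar n)

-- shifting a diagonal row one place right gives the next diagonal row
theorem pv_shift (scalar : Int) (n k : Nat) (hk : k + 1 < n) :
    [0] ++ (pvMrow scalar n k).dropLast = pvMrow scalar n (k + 1) := by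
  apply List.ext_getElem
  · simp [pvMrow]; omega
  · intro j h1 h2
    rcases j with _ | j
    · simp [pvMrow]
    · have hlen : (pvMrow scalar n k).dropLast.length = n - 1 := by simp [pvMrow]
      simp only [List.cons_append, List.nil_append, List.getElem_cons_succ]
      rw [List.getElem_dropLast]
      unfold pvMrow
      simp only [List.getElem_map, List.getElem_range]
      by_cases h : k = j
      · rw [if_pos h, if_pos (by omega)]
      · rw [if_neg h, if_neg (by omega)]

-- the loop invariant of B's fold
theorem pv_fold (scalar : Int) (n : Nat) (hn : 1 ≤ n) :
    ∀ (k : Nat), k ≤ n - 1 →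
      (PySem.List.pyRange 0 (k : Int) 1).foldl (fun result _ =>
          let prev := (PySem.List.pyGet? result (-1)).getD []
          result ++ [[0] ++ PySem.List.slice prev none (some (-1))])
        [pvMrow scalar n 0]
      = (List.range (k + 1)).map (pvMrow scalar n) := by
  intro k
  induction k with
  | zero =>
    intro _
    rw [PySem.List.pyRange_one_eq_nil (by omega), List.foldl_nil]
    simp
  | succ k ih =>
    intro hk
    have hcast : ((k + 1 : Nat) : Int) = (k : Int) + 1 := by push_cast; ring
    rw [hcast, PySem.List.pyRange_one_succ_right (by omega), List.foldl_append,
        ih (by omega), List.foldl_cons, List.foldl_nil]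
    simp only
    rw [List.range_succ, List.map_append, List.map_singleton,
        PySem.List.pyGet?_neg_one_append_singleton, Option.getD_some,
        PySem.List.slice_to_neg_one, pv_shift scalar n k (by omega)]
    rw [List.range_succ (n := k + 1), List.map_append, List.map_singleton,
        List.range_succ, List.map_append, List.map_singleton, List.append_assoc]

-- an append-accumulator fold is a map
theorem pv_foldl_app {α β : Type} (f : α → β) :
    ∀ (l : List α) (init : List β),
      l.foldl (fun acc x => acc ++ [f x]) init = init ++ l.map f := by
  intro l
  induction l with
  | nil => intro init; simp
  | cons x xs ih => intro init; simp [List.foldl_cons, ih]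

-- the first row of scalar*I_(n+1)
theorem pv_row_zero (scalar : Int) (n : Nat) :
    pvMrow scalar (n + 1) 0 = [scalar] ++ List.replicate n 0 := by
  unfold pvMrow
  rw [List.range_succ_eq_map, List.map_cons, List.map_map]
  simp [List.eq_replicate_iff]

-- A's row i equals the canonical row
theorem pv_A_row (scalar : Int) (n : Nat) (i : Int) (h0 : 0 ≤ i) :
    (List.range n).map ((fun (j : Int) => if (i == j) = true then scalar else 0)
        ∘ fun (k : Nat) => (0 : Int) + (k : Int))
      = pvMrow scalar n i.toNat := by
  unfold pvMrow
  apply List.map_congr_left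
  intro k hk
  simp only [Function.comp]
  by_cases hik : i.toNat = k
  · have : (i == (0 : Int) + (k : Int)) = true := by simp only [beq_iff_eq]; omega
    rw [this, if_pos hik]
    simp
  · have : (i == (0 : Int) + (k : Int)) = false := by
      simp only [beq_eq_false_iff_ne, ne_eq]; omega
    rw [this, if_neg hik]
    simp

-- A computes the canonical matrix
theorem pv_A_eq_M (scalar : Int) (size : Int) :
    I_mul_scalar scalar size = pvM scalar size.toNat := by
  unfold I_mul_scalar pvM
  simp only [pv_foldl_app, List.nil_append]
  rw [PySem.List.pyRange_one (a := 0) (b := size)]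
  rw [List.map_map]
  simp only [Int.sub_zero]
  apply List.map_congr_left
  intro k hk
  rw [List.mem_range] at hk
  simp only [Function.comp]
  rw [List.map_map]
  rw [pv_A_row scalar size.toNat ((0 : Int) + (k : Int)) (by omega)]
  have h1 : ((0 : Int) + (k : Int)).toNat = k := by omega
  rw [h1]

-- ===== VERDICT (by name: the statement is the Claim_ definition above) =====
theorem I_mul_scalar_spec : Claim_equal_I_mul_scalar := by
  intro scalar size _
  unfold Spec_I_mul_scalar I_mul_scalar_alt
  by_cases hs : size ≤ 0
  · rw [if_pos hs, pv_A_eq_M]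
    have : size.toNat = 0 := by omega
    rw [this]
    simp [pvM]
  · rw [if_neg hs]
    have hn : 1 ≤ size.toNat := by omega
    have h1 : ((size.toNat - 1 : Nat) : Int) = size - 1 := by omega
    have h2 : (size - 1).toNat = size.toNat - 1 := by omega
    have hrow : [scalar] ++ List.replicate (size - 1).toNat 0 = pvMrow scalar size.toNat 0 := by
      rw [h2]
      have : size.toNat = (size.toNat - 1) + 1 := by omega
      rw [this, pv_row_zero]
      simp
    rw [hrow, ← h1, pv_fold scalar size.toNat hn (size.toNat - 1) (by omega), pv_A_eq_M]
    have h3 : size.toNat - 1 + 1 = size.toNat := by omega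
    rw [h3]
    rfl
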